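-- pv_equiv track=rewrite | github.com/jpfutalef/DynamicStochasticElectricVRP | res/GA_real_time.py | block_indices
-- ===== SOURCE A (Python) =====
-- def block_indices(customer_count, allowed_charging_operations=2):
--     """
--     Creates the indices of sub blocks.
--     :param customer_count: list with the amount of customer to visit, after initial condition
--     :param allowed_charging_operations:
--     :return: tuples list with indices [(i0, j0), (i1, j1),...] where iN represent location of the beginning of customers_per_vehicle
--     block and jN location of the beginning of charging operations block of evN in the individual, respectively.
--     """
--     indices = []
--
--     i0 = 0
--     i1 = 0
--     for ni in customer_count:
--         i1 += ni
--
--         indices.append((i0, i1))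
--
--         i0 += ni + 3 * allowed_charging_operations
--         i1 += 3 * allowed_charging_operations
--
--     return indices
-- ===== SOURCE B (Python) =====
-- from itertools import accumulate
--
-- def block_indices(customer_count, allowed_charging_operations=2):
--     sizes = [ni + 3 * allowed_charging_operations for ni in customer_count]
--     starts = list(accumulate([0] + sizes[:-1]))
--     return [(s, s + ni) for s, ni in zip(starts, customer_count)]
-- ===== Notes on version B (the rewrite author's own statement) =====
-- stated objective: alternative
-- what changed: Replaces the single loop with two interleaved accumulators by a two-phase decomposition: materialize a prefix-sum table of block sizes (accumulate), then zip the start table with customer_count to emit (start, start+ni) pairs.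
import Mathlib
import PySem

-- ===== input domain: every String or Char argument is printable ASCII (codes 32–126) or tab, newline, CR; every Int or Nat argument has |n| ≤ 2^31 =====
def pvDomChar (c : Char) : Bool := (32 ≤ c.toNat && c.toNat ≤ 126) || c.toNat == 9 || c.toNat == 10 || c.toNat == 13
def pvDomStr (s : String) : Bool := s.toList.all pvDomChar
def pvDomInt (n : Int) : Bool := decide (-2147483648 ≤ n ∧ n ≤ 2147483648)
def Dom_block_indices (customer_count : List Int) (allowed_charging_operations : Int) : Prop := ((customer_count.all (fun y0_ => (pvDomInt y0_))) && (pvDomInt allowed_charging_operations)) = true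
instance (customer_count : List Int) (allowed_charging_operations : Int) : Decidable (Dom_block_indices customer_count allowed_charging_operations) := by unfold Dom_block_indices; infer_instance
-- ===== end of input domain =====

-- ===== PORT A =====
-- A: single loop keeping accumulators i0 (block start) and i1 (running end), appending (i0, i1).
def block_indices (customer_count : List Int) (allowed_charging_operations : Int) : List (Int × Int) :=
  (customer_count.foldl
    (fun (st : List (Int × Int) × Int × Int) ni =>
      let i1 := st.2.2 + ni
      (st.1 ++ [(st.2.1, i1)], st.2.1 + ni + 3 * allowed_charging_operations, i1 + 3 * allowed_charging_operations))
    ([], 0, 0)).1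

-- ===== PORT B =====
-- B: two phases — a prefix-sum table of block sizes, then a zip producing the pairs.
def block_indices_alt (customer_count : List Int) (allowed_charging_operations : Int) : List (Int × Int) :=
  let sizes := customer_count.map (fun ni => ni + 3 * allowed_charging_operations)
  let starts := ((0 :: sizes.dropLast).scanl (· + ·) 0).tail
  starts.zipWith (fun s ni => (s, s + ni)) customer_count

-- ===== PRECONDITION & SPEC =====
def Spec_block_indices (customer_count : List Int) (allowed_charging_operations : Int) (out : List (Int × Int)) : Prop := out = block_indices_alt customer_count allowed_charging_operations
instance (customer_count : List Int) (allowed_charging_operations : Int) (out : List (Int × Int)) : Decidable (Spec_block_indices customer_count allowed_charging_operations out) := by unfold Spec_block_indices; infer_instance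

-- ===== CLAIM (what is proved, stated in full; the proofs are below) =====
def Claim_equal_block_indices : Prop := ∀ (customer_count : List Int) (allowed_charging_operations : Int), Dom_block_indices customer_count allowed_charging_operations → Spec_block_indices customer_count allowed_charging_operations (block_indices customer_count allowed_charging_operations)

-- ===== LEMMAS AND PROOFS =====

-- ===== VERDICT (by name: the statement is the Claim_ definition above) =====
-- Common recursive characterisation: pairs starting at `c`.
def biGo (a : Int) : List Int → Int → List (Int × Int)
  | [], _ => []
  | ni :: t, c => (c, c + ni) :: biGo a t (c + ni + 3 * a)

theorem biA (a : Int) (l : List Int) : ∀ (acc : List (Int × Int)) (c : Int),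
    (l.foldl
      (fun (st : List (Int × Int) × Int × Int) ni =>
        let i1 := st.2.2 + ni
        (st.1 ++ [(st.2.1, i1)], st.2.1 + ni + 3 * a, i1 + 3 * a))
      (acc, c, c)).1 = acc ++ biGo a l c := by
  induction l with
  | nil => intro acc c; simp [biGo]
  | cons ni t ih =>
      intro acc c
      simp only [List.foldl, biGo]
      have h := ih (acc ++ [(c, c + ni)]) (c + ni + 3 * a)
      simpa using h

theorem biB (a : Int) (l : List Int) : ∀ (c : Int),
    (List.scanl (· + ·) c ((l.map (fun ni => ni + 3 * a)).dropLast)).zipWith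
      (fun s ni => (s, s + ni)) l = biGo a l c := by
  induction l with
  | nil => intro c; simp [biGo]
  | cons ni t ih =>
      intro c
      cases t with
      | nil => simp [biGo, List.scanl]
      | cons m t' =>
          show (List.scanl (· + ·) c
              ((ni + 3 * a) :: ((m :: t').map (fun ni => ni + 3 * a)).dropLast)).zipWith
            (fun s ni => (s, s + ni)) (ni :: m :: t') = biGo a (ni :: m :: t') c
          rw [List.scanl_cons, List.zipWith_cons_cons, biGo,
            show c + (ni + 3 * a) = c + ni + 3 * a from by ring, ih (c + ni + 3 * a)]

-- ===== VERDICT (by name: the statement is the Claim_ definition above) =====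
theorem block_indices_spec : Claim_equal_block_indices := by
  intro cc a _
  unfold Spec_block_indices block_indices block_indices_alt
  rw [biA a cc [] 0]
  cases cc with
  | nil => simp [biGo]
  | cons ni t =>
      have := biB a (ni :: t) 0
      simpa [List.scanl] using this.symm
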